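-- pv_equiv track=rewrite | github.com/LucileVG/DCA_polymorphism_Ecoli | src/utils.py | reverse_translate
-- ===== SOURCE A (Python) =====
-- def reverse_translate(nucl_seq,aln_prot_seq):
--     '''
--     Reverse-align a dna sequence from an aligned protein sequence.
--     '''
--     start_gap = len(aln_prot_seq)-len(aln_prot_seq.lstrip('-')) # Number of gaps at the beginning of the aligned protein sequence
--     end_gap = len(aln_prot_seq)-len(aln_prot_seq.rstrip('-')) # Number of gaps at the end of the aligned protein sequence
--     aln_prot_seq = aln_prot_seq.lstrip('-').rstrip('-') # We remove starting and ending gaps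
--     values = [len(AA)*3 for AA in aln_prot_seq.split("-")] # Each element of the list is the number of aminoacids between two consecutive gaps (can be 0 if there are several gaps one after the other) multiplied by 3 in order to have the number of nucleotides
--     aln_nucl_seq = "---"*start_gap # Start the aligned nucleotidic sequence
--     count = 0
--     for bps in values: # Loop to add nucleotides and gaps
--         aln_nucl_seq = aln_nucl_seq+nucl_seq[count:count+bps]+"---"
--         count += bps
--     return aln_nucl_seq.rstrip('---')+"---"*end_gap # Add the ending gaps
-- ===== SOURCE B (Python) =====
-- def reverse_translate(nucl_seq, aln_prot_seq):
--     '''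
--     Reverse-align a dna sequence from an aligned protein sequence.
--     Single pass over the aligned protein: one piece per character.
--     '''
--     end_gap = len(aln_prot_seq) - len(aln_prot_seq.rstrip('-'))
--     pieces = []
--     i = 0
--     for c in aln_prot_seq:
--         if c == '-':
--             pieces.append('---')
--         else:
--             pieces.append(nucl_seq[i:i+3])
--             i += 3
--     return ''.join(pieces).rstrip('-') + '---' * end_gap
-- ===== Notes on version B (the rewrite author's own statement) =====
-- stated objective: simpler
-- what changed: Replaced the lstrip/split('-')/per-segment slicing loop with a counter by a single per-character pass over the aligned protein that emits '---' for a gap and the next codon slice otherwise, keeping only the final rstrip-and-reappend of trailing gaps.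
import Mathlib
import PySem

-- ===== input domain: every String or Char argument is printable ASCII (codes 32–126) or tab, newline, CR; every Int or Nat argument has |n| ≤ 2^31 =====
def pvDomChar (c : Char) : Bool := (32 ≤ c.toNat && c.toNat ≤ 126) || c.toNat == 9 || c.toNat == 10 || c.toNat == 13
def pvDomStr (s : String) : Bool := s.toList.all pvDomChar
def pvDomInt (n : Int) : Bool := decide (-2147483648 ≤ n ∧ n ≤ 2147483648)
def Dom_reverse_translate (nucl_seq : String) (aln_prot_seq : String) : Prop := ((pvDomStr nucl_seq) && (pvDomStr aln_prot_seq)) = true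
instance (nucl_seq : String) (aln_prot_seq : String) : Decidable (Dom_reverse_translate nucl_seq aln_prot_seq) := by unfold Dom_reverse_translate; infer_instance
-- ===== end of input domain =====

-- B replaces A's lstrip/split('-')/per-segment loop by a single per-character pass (simpler decomposition, same cost).

-- ===== PORT A =====
-- hand-ports of Python's s.lstrip('-') / s.rstrip('-') (strip the given character from one side);
-- PySem.Chars.stripChars is two-sided, so these are written out; exact on all strings
def pvLstripDash (l : List Char) : List Char := l.dropWhile (· == '-')
def pvRstripDash (l : List Char) : List Char := (l.reverse.dropWhile (· == '-')).reverse
-- the string "---" as a char list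
def pvDash3 : List Char := ['-', '-', '-']

def reverse_translate (nucl_seq : String) (aln_prot_seq : String) : String :=
  let nucl := nucl_seq.toList
  let prot := aln_prot_seq.toList
  let start_gap := prot.length - (pvLstripDash prot).length
  let end_gap := prot.length - (pvRstripDash prot).length
  let p := pvRstripDash (pvLstripDash prot)
  let values := (PySem.Chars.splitOn p ['-']).map (fun AA => AA.length * 3)
  -- "---"*start_gap (string repetition = flattened replication)
  let init := (List.replicate start_gap pvDash3).flatten
  let res := values.foldl (fun (st : List Char × Nat) (bps : Nat) =>
      (st.1 ++ PySem.List.slice nucl (some (st.2 : Int)) (some ((st.2 : Int) + (bps : Int))) ++ pvDash3,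
       st.2 + bps)) (init, 0)
  String.ofList (pvRstripDash res.1 ++ (List.replicate end_gap pvDash3).flatten)

-- ===== PORT B =====
def reverse_translate_alt (nucl_seq : String) (aln_prot_seq : String) : String :=
  let nucl := nucl_seq.toList
  let prot := aln_prot_seq.toList
  let end_gap := prot.length - (pvRstripDash prot).length
  -- single pass: pieces list + nucleotide index, then ''.join (= flatten)
  let res := prot.foldl (fun (st : List (List Char) × Nat) c =>
      if c = '-' then (st.1 ++ [pvDash3], st.2)
      else (st.1 ++ [PySem.List.slice nucl (some (st.2 : Int)) (some ((st.2 : Int) + 3))], st.2 + 3))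
      ([], 0)
  String.ofList (pvRstripDash res.1.flatten ++ (List.replicate end_gap pvDash3).flatten)

-- ===== PRECONDITION & SPEC =====
def Spec_reverse_translate (nucl_seq : String) (aln_prot_seq : String) (out : String) : Prop := out = reverse_translate_alt nucl_seq aln_prot_seq
instance (nucl_seq : String) (aln_prot_seq : String) (out : String) : Decidable (Spec_reverse_translate nucl_seq aln_prot_seq out) := by unfold Spec_reverse_translate; infer_instance

-- ===== CLAIM (what is proved, stated in full; the proofs are below) =====
def Claim_equal_reverse_translate : Prop := ∀ (nucl_seq : String) (aln_prot_seq : String), Dom_reverse_translate nucl_seq aln_prot_seq → Spec_reverse_translate nucl_seq aln_prot_seq (reverse_translate nucl_seq aln_prot_seq)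

-- ===== LEMMAS AND PROOFS =====

-- nucl[c:c+n] for natural bounds
def pvSliceN (nucl : List Char) (c n : Nat) : List Char := (nucl.drop c).take n

-- the per-character semantics both loops compute
def pvF (nucl : List Char) : List Char → Nat → List Char
  | [], _ => []
  | c :: t, i => if c = '-' then pvDash3 ++ pvF nucl t i else pvSliceN nucl i 3 ++ pvF nucl t (i + 3)

def pvCount (l : List Char) : Nat := (l.filter (fun c => c ≠ '-')).length

-- functional form of Python's split('-')
def pvSplitD (pre : List Char) : List Char → List (List Char)
  | [] => [pre]
  | c :: t => if c = '-' then pre :: pvSplitD [] t else pvSplitD (pre ++ [c]) t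

-- functional form of A's loop body
def pvAvals (nucl : List Char) : List Nat → Nat → List Char
  | [], _ => []
  | v :: vs, c => pvSliceN nucl c v ++ pvDash3 ++ pvAvals nucl vs (c + v)

-- the pieces list B builds
def pvPieces (nucl : List Char) : List Char → Nat → List (List Char)
  | [], _ => []
  | c :: t, i => if c = '-' then pvDash3 :: pvPieces nucl t i else pvSliceN nucl i 3 :: pvPieces nucl t (i + 3)

lemma pv_slice_eq (xs : List Char) (j n : Nat) :
    PySem.List.slice xs (some (j : Int)) (some ((j : Int) + (n : Int))) = pvSliceN xs j n :=
  PySem.List.slice_natCast_add xs j n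

lemma pv_slice3_eq (xs : List Char) (j : Nat) :
    PySem.List.slice xs (some (j : Int)) (some ((j : Int) + 3)) = pvSliceN xs j 3 := by
  have := PySem.List.slice_natCast_add xs j 3
  simpa using this

lemma pv_go_eq (fuel : Nat) : ∀ (l cur : List Char) (acc : List (List Char)), l.length ≤ fuel →
    PySem.Chars.splitOn.go ['-'] fuel l cur acc = acc.reverse ++ pvSplitD cur.reverse l := by
  induction fuel with
  | zero =>
    intro l cur acc h
    have : l = [] := List.eq_nil_of_length_eq_zero (Nat.le_zero.mp h)
    subst this
    simp [PySem.Chars.splitOn.go, pvSplitD]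
  | succ n ih =>
    intro l cur acc h
    match l with
    | [] => simp [PySem.Chars.splitOn.go, pvSplitD]
    | c :: rest =>
      rw [PySem.Chars.splitOn.go]
      by_cases hc : c = '-'
      · subst hc
        have hpre : List.isPrefixOf ['-'] ('-' :: rest) = true := by
          simp [List.isPrefixOf]
        rw [if_pos hpre]
        simp only [List.length_cons] at h
        rw [ih _ _ _ (by simpa using h)]
        simp [pvSplitD, List.reverse_cons]
      · have hpre : List.isPrefixOf ['-'] (c :: rest) = false := by
          simp [List.isPrefixOf]
          exact fun hh => absurd hh.symm hc
        rw [if_neg (by simp [hpre])]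
        simp only [List.length_cons] at h
        rw [ih _ _ _ (by omega)]
        simp [pvSplitD, hc, List.reverse_cons]

lemma pv_splitOn_eq (l : List Char) : PySem.Chars.splitOn l ['-'] = pvSplitD [] l := by
  rw [PySem.Chars.splitOn, pv_go_eq _ _ _ _ (by omega)]
  simp

lemma pv_foldA (nucl : List Char) (vs : List Nat) : ∀ (acc : List Char) (c : Nat),
    vs.foldl (fun (st : List Char × Nat) (bps : Nat) =>
      (st.1 ++ PySem.List.slice nucl (some (st.2 : Int)) (some ((st.2 : Int) + (bps : Int))) ++ pvDash3,
       st.2 + bps)) (acc, c) = (acc ++ pvAvals nucl vs c, c + vs.sum) := by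
  induction vs with
  | nil => intro acc c; simp [pvAvals]
  | cons v t ih =>
    intro acc c
    rw [List.foldl_cons, ih]
    simp only [pvAvals, pv_slice_eq, List.sum_cons, List.append_assoc]
    exact Prod.ext (by simp) (by omega)

lemma pv_foldB (nucl : List Char) (l : List Char) : ∀ (ps : List (List Char)) (i : Nat),
    l.foldl (fun (st : List (List Char) × Nat) c =>
      if c = '-' then (st.1 ++ [pvDash3], st.2)
      else (st.1 ++ [PySem.List.slice nucl (some (st.2 : Int)) (some ((st.2 : Int) + 3))], st.2 + 3))
      (ps, i) = (ps ++ pvPieces nucl l i, i + 3 * pvCount l) := by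
  induction l with
  | nil => intro ps i; simp [pvPieces, pvCount]
  | cons c t ih =>
    intro ps i
    by_cases h : c = '-'
    · rw [List.foldl_cons, if_pos h, ih]
      simp [pvPieces, pvCount, h]
    · rw [List.foldl_cons, if_neg h, ih]
      simp only [pvPieces, if_neg h, pv_slice3_eq, List.filter_cons, pvCount]
      refine Prod.ext (by simp) ?_
      simp [h]
      ring

lemma pv_flatten_pieces (nucl l : List Char) : ∀ (i : Nat),
    (pvPieces nucl l i).flatten = pvF nucl l i := by
  induction l with
  | nil => intro i; simp [pvPieces, pvF]
  | cons c t ih => intro i; by_cases h : c = '-' <;> simp [pvPieces, pvF, h, ih]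

lemma pv_F_append (nucl l1 l2 : List Char) : ∀ (i : Nat),
    pvF nucl (l1 ++ l2) i = pvF nucl l1 i ++ pvF nucl l2 (i + 3 * pvCount l1) := by
  induction l1 with
  | nil => intro i; simp [pvF, pvCount]
  | cons c t ih =>
    intro i
    by_cases h : c = '-'
    · simp [pvF, h, ih, pvCount, List.filter]
    · simp only [List.cons_append, pvF, h, if_false, ih, List.append_assoc]
      have : i + 3 * pvCount (c :: t) = i + 3 + 3 * pvCount t := by
        simp [pvCount, h]; ring
      rw [this]

lemma pv_flatten_rep (k : Nat) : (List.replicate k pvDash3).flatten = List.replicate (3 * k) '-' := by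
  induction k with
  | zero => simp
  | succ n ih =>
    simp only [List.replicate_succ, List.flatten_cons, ih]
    rw [show 3 * (n + 1) = 3 + 3 * n by ring, List.replicate_add]
    rfl

lemma pv_F_dashes (nucl : List Char) (k : Nat) : ∀ i,
    pvF nucl (List.replicate k '-') i = List.replicate (3 * k) '-' := by
  induction k with
  | zero => intro i; simp [pvF]
  | succ n ih =>
    intro i
    simp only [List.replicate_succ, pvF, ih]
    rw [show 3 * (n + 1) = 3 + 3 * n by ring, List.replicate_add]
    rfl

lemma pvCount_rep (k : Nat) : pvCount (List.replicate k '-') = 0 := by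
  simp [pvCount]

lemma pv_dropWhile_rep (k : Nat) (t : List Char) :
    (List.replicate k '-' ++ t).dropWhile (· == '-') = t.dropWhile (· == '-') := by
  induction k with
  | zero => simp
  | succ n ih => simp [List.replicate_succ, ih]

lemma pv_rstrip_append_rep (x : List Char) (k : Nat) :
    pvRstripDash (x ++ List.replicate k '-') = pvRstripDash x := by
  unfold pvRstripDash
  rw [List.reverse_append, List.reverse_replicate, pv_dropWhile_rep]

lemma pv_lstrip_decomp (l : List Char) :
    l = List.replicate (l.length - (pvLstripDash l).length) '-' ++ pvLstripDash l := by
  unfold pvLstripDash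
  have h1 : l.takeWhile (· == '-') = List.replicate (l.takeWhile (· == '-')).length '-' := by
    apply List.eq_replicate_of_mem
    intro c hc
    have := List.mem_takeWhile_imp hc
    simpa using this
  have h2 : (l.takeWhile (· == '-')).length = l.length - (l.dropWhile (· == '-')).length := by
    have := List.takeWhile_append_dropWhile (p := (· == '-')) (l := l)
    have hlen := congrArg List.length this
    rw [List.length_append] at hlen
    omega
  conv_lhs => rw [← List.takeWhile_append_dropWhile (p := (· == '-')) (l := l)]
  rw [h1, h2]

lemma pv_rstrip_decomp (l : List Char) :
    l = pvRstripDash l ++ List.replicate (l.length - (pvRstripDash l).length) '-' := by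
  unfold pvRstripDash
  conv_lhs => rw [← l.reverse_reverse]
  conv_lhs => rw [← List.takeWhile_append_dropWhile (p := (· == '-')) (l := l.reverse)]
  rw [List.reverse_append]
  congr 1
  have h1 : l.reverse.takeWhile (· == '-') = List.replicate (l.reverse.takeWhile (· == '-')).length '-' := by
    apply List.eq_replicate_of_mem
    intro c hc
    have := List.mem_takeWhile_imp hc
    simpa using this
  have h2 : (l.reverse.takeWhile (· == '-')).length = l.length - ((l.reverse.dropWhile (· == '-')).reverse).length := by
    have := List.takeWhile_append_dropWhile (p := (· == '-')) (l := l.reverse)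
    have hlen := congrArg List.length this
    rw [List.length_append] at hlen
    simp only [List.length_reverse] at hlen ⊢
    omega
  rw [h1, h2, List.reverse_replicate]

lemma pvSliceN_add (nucl : List Char) (c a b : Nat) :
    pvSliceN nucl c (a + b) = pvSliceN nucl c a ++ pvSliceN nucl (c + a) b := by
  unfold pvSliceN
  rw [List.take_add, List.drop_drop]

lemma pv_avals_split (nucl : List Char) (p : List Char) : ∀ (pre : List Char) (c : Nat),
    pvAvals nucl ((pvSplitD pre p).map (fun AA => AA.length * 3)) c
      = pvSliceN nucl c (3 * pre.length) ++ pvF nucl p (c + 3 * pre.length) ++ pvDash3 := by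
  induction p with
  | nil =>
    intro pre c
    simp [pvSplitD, pvAvals, pvF, Nat.mul_comm]
  | cons a t ih =>
    intro pre c
    by_cases h : a = '-'
    · rw [show pvSplitD pre (a :: t) = pre :: pvSplitD [] t by simp [pvSplitD, h]]
      rw [List.map_cons]
      rw [show pvAvals nucl ((pre.length * 3) :: (pvSplitD [] t).map (fun AA => AA.length * 3)) c
            = pvSliceN nucl c (pre.length * 3) ++ pvDash3 ++ pvAvals nucl ((pvSplitD [] t).map (fun AA => AA.length * 3)) (c + pre.length * 3) from rfl]
      rw [ih [] (c + pre.length * 3)]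
      rw [show pvF nucl (a :: t) (c + 3 * pre.length) = pvDash3 ++ pvF nucl t (c + 3 * pre.length) by simp [pvF, h]]
      simp only [List.length_nil, Nat.mul_zero, Nat.add_zero, pvSliceN, List.take_zero, List.nil_append]
      rw [show pre.length * 3 = 3 * pre.length by ring]
      simp [List.append_assoc]
    · rw [show pvSplitD pre (a :: t) = pvSplitD (pre ++ [a]) t by simp [pvSplitD, h]]
      rw [ih (pre ++ [a]) c]
      rw [show pvF nucl (a :: t) (c + 3 * pre.length) = pvSliceN nucl (c + 3 * pre.length) 3 ++ pvF nucl t (c + 3 * pre.length + 3) by simp [pvF, h]]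
      rw [List.length_append, List.length_singleton]
      rw [show 3 * (pre.length + 1) = 3 * pre.length + 3 by ring, pvSliceN_add]
      simp [List.append_assoc]
      rw [Nat.add_assoc]

lemma pv_main (nucl prot : List Char) :
    pvRstripDash ((List.replicate (prot.length - (pvLstripDash prot).length) pvDash3).flatten
        ++ pvAvals nucl ((PySem.Chars.splitOn (pvRstripDash (pvLstripDash prot)) ['-']).map (fun AA => AA.length * 3)) 0)
      = pvRstripDash ((pvPieces nucl prot 0).flatten) := by
  rw [pv_splitOn_eq, pv_avals_split nucl _ [] 0, pv_flatten_pieces, pv_flatten_rep]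
  simp only [List.length_nil, Nat.mul_zero, pvSliceN, List.take_zero, List.nil_append, Nat.add_zero]
  have hd1 := pv_lstrip_decomp prot
  set rest := pvLstripDash prot with hrest
  set s := prot.length - rest.length with hs
  have hd2 := pv_rstrip_decomp rest
  set p := pvRstripDash rest with hp
  set e2 := rest.length - p.length with he2
  clear_value rest s p e2
  -- rewrite the right-hand side through the decompositions
  conv_rhs => rw [hd1, pv_F_append, pvCount_rep, pv_F_dashes]
  simp only [Nat.mul_zero, Nat.add_zero]
  conv_rhs => rw [hd2, pv_F_append]
  rw [pv_F_dashes]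
  rw [show pvDash3 = List.replicate 3 '-' from rfl]
  rw [← List.append_assoc, pv_rstrip_append_rep]
  rw [← List.append_assoc, pv_rstrip_append_rep]

-- ===== VERDICT (by name: the statement is the Claim_ definition above) =====
theorem reverse_translate_spec : Claim_equal_reverse_translate := by
  intro nucl_seq aln_prot_seq _
  unfold Spec_reverse_translate reverse_translate reverse_translate_alt
  simp only [pv_foldA, pv_foldB]
  exact congrArg String.ofList (congrArg (· ++ _) (pv_main nucl_seq.toList aln_prot_seq.toList))
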